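-- pv_equiv track=rewrite | github.com/Benoit-F-Q/Perceval | perceval/utils/Fock.py | getSeparatorIndices
-- ===== SOURCE A (Python) =====
-- from typing import List, Tuple
--
-- def getMaxCombinLessThan(value : int, k : int) -> Tuple[int, int]:
--     # Amelioration possible ?
--     # precalculer le vecteur des [combin(j, k) for j in 0..infinity]
--     # et utiliser bisect.bisect()
--     if value == 0:
--         return k-1, 0
--     result = k
--     current = 1
--     i = 1
--     while True:
--         next = (current * (result + 1)) // i
--         if next > value:
--             return result, current
--         i += 1
--         result += 1
--         current = next
--
-- def getSeparatorIndices(index : int, m : int) -> List[int]: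
--     result = []
--     while m > 0:
--         currentvalue, currentIndex = getMaxCombinLessThan(index, m)
--         result.insert(0, currentvalue)
--         index -= currentIndex
--         m -= 1
--     return result
-- ===== SOURCE B (Python) =====
-- from typing import List
--
--
-- def _comb(n: int, k: int) -> int:
--     # binomial coefficient C(n, k), exact product formula over the shorter side
--     if k < 0 or k > n:
--         return 0
--     k = min(k, n - k)
--     c = 1
--     for j in range(1, k + 1):
--         c = c * (n - k + j) // j
--     return c
--
--
-- def getSeparatorIndices(index: int, m: int) -> List[int]:
--     result = []
--     for k in range(m, 0, -1):
--         # binary search for the largest n with C(n, k) <= index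
--         lo = k - 1
--         d = 1
--         while _comb(lo + d, k) <= index:
--             d *= 2
--         hi = lo + d
--         while hi - lo > 1:
--             mid = (lo + hi) // 2
--             if _comb(mid, k) <= index:
--                 lo = mid
--             else:
--                 hi = mid
--         result.append(lo)
--         index -= _comb(lo, k)
--     result.reverse()
--     return result
-- ===== Notes on version B (the rewrite author's own statement) =====
-- stated objective: faster
-- what changed: Each combinadic digit is found by exponential growth plus binary search over n with C(n,k) <= index (binomials computed by a closed product formula), instead of A's linear scan that steps n upward one at a time.
-- outside the precondition, e.g. on getSeparatorIndices(-1, 2): A returns [1, 2], B returns [0, 1]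
import Mathlib
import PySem

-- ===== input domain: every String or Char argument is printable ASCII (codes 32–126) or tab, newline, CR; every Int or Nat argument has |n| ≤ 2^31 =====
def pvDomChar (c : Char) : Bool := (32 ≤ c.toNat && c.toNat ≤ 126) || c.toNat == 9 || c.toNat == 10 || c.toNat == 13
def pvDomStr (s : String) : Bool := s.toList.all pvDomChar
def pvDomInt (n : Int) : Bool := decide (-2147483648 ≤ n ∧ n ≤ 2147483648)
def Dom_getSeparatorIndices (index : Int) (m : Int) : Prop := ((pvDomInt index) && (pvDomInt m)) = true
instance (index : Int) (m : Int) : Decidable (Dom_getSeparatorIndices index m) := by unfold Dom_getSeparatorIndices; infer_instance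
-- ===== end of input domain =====

-- B replaces A's per-digit linear scan (n stepped up one at a time until C(n,k) > index) by
-- exponential growth plus binary search on n, with binomials from the closed product formula.

-- ===== PORT A =====
-- while True loop of getMaxCombinLessThan; fuel value.toNat+2 always suffices (≥ value iterations never occur)
def gmcLoop (fuel : Nat) (value result current i : Int) : Int × Int :=
  match fuel with
  | 0 => (result, current)
  | f + 1 =>
    let next := PySem.Int.floordiv (current * (result + 1)) i
    if next > value then (result, current)
    else gmcLoop f value (result + 1) next (i + 1)

def getMaxCombinLessThan (value k : Int) : Int × Int :=
  if value = 0 then (k - 1, 0) else gmcLoop (value.toNat + 2) value k 1 1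

-- while m > 0 loop; fuel m.toNat matches the loop exactly
def gsiGo (fuel : Nat) (index m : Int) (acc : List Int) : List Int :=
  match fuel with
  | 0 => acc
  | f + 1 =>
    if m > 0 then
      let p := getMaxCombinLessThan index m
      gsiGo f (index - p.2) (m - 1) (p.1 :: acc)
    else acc

def getSeparatorIndices (index : Int) (m : Int) : List Int :=
  gsiGo m.toNat index m []

-- ===== PORT B =====
-- _comb's for-loop over range(1, k+1)
def combGo (n k c j : Int) (fuel : Nat) : Int :=
  match fuel with
  | 0 => c
  | f + 1 => combGo n k (PySem.Int.floordiv (c * (n - k + j)) j) (j + 1) f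

def combB (n k : Int) : Int :=
  if k < 0 ∨ n < k then 0
  else
    let k2 := min k (n - k)
    combGo n k2 1 1 k2.toNat

-- while _comb(lo+d,k) <= index: d *= 2 ; fuel index.toNat+2 always suffices
def growD (v k lo d : Int) (fuel : Nat) : Int :=
  match fuel with
  | 0 => d
  | f + 1 => if combB (lo + d) k ≤ v then growD v k lo (d * 2) f else d

-- while hi - lo > 1 bisection; fuel (hi-lo).toNat always suffices
def bisectGo (v k lo hi : Int) (fuel : Nat) : Int :=
  match fuel with
  | 0 => lo
  | f + 1 =>
    if hi - lo > 1 then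
      let mid := PySem.Int.floordiv (lo + hi) 2
      if combB mid k ≤ v then bisectGo v k mid hi f else bisectGo v k lo mid f
    else lo

def altStep (v k : Int) : Int :=
  let lo := k - 1
  let hi := lo + growD v k lo 1 (v.toNat + 2)
  bisectGo v k lo hi (hi - lo).toNat

-- for k in range(m,0,-1) loop, appending each digit; final reverse
def gsiAltGo (fuel : Nat) (index m : Int) (acc : List Int) : List Int :=
  match fuel with
  | 0 => acc
  | f + 1 =>
    if m > 0 then
      let lo := altStep index m
      gsiAltGo f (index - combB lo m) (m - 1) (acc ++ [lo])
    else acc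

def getSeparatorIndices_alt (index : Int) (m : Int) : List Int :=
  (gsiAltGo m.toNat index m []).reverse

-- ===== PRECONDITION & SPEC =====
-- Pre_ restricts to the combinadic code's natural domain: a negative index (with m > 0 digits
-- to decode) is outside it, and there A's scan accidentally returns digit k with count 1 at
-- every position (A returns [1..m], B returns [0..m-1]).
def Pre_getSeparatorIndices (index : Int) (m : Int) : Prop := 0 ≤ index ∨ m ≤ 0
instance (index : Int) (m : Int) : Decidable (Pre_getSeparatorIndices index m) := by
  unfold Pre_getSeparatorIndices; infer_instance

def pvWitness_getSeparatorIndices : Int × Int := (5, 3)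

def Spec_getSeparatorIndices (index : Int) (m : Int) (out : List Int) : Prop := out = getSeparatorIndices_alt index m
instance (index : Int) (m : Int) (out : List Int) : Decidable (Spec_getSeparatorIndices index m out) := by unfold Spec_getSeparatorIndices; infer_instance

-- ===== CLAIM (what is proved, stated in full; the proofs are below) =====
def Claim_equal_getSeparatorIndices : Prop := ∀ (index : Int) (m : Int), Dom_getSeparatorIndices index m → Pre_getSeparatorIndices index m → Spec_getSeparatorIndices index m (getSeparatorIndices index m)

-- ===== LEMMAS AND PROOFS =====

-- the per-digit "sandwich" characterisation: n is THE digit iff C(n,k) ≤ v < C(n+1,k)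
lemma sand_unique {kn a b v : Nat} (ha1 : Nat.choose a kn ≤ v) (ha2 : v < Nat.choose (a + 1) kn)
    (hb1 : Nat.choose b kn ≤ v) (hb2 : v < Nat.choose (b + 1) kn) : a = b := by
  rcases lt_trichotomy a b with h | h | h
  · have := Nat.choose_le_choose kn (show a + 1 ≤ b by omega)
    omega
  · exact h
  · have := Nat.choose_le_choose kn (show b + 1 ≤ a by omega)
    omega

lemma choose_big (v kn : Nat) (hk : 1 ≤ kn) : v < Nat.choose (v + kn) kn := by
  have h1 : Nat.choose (v + kn) ((v + kn) - kn) = Nat.choose (v + kn) kn :=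
    Nat.choose_symm (by omega)
  have h2 : (v + kn) - kn = v := by omega
  have h3 : Nat.choose (v + 1) v ≤ Nat.choose (v + kn) v :=
    Nat.choose_le_choose v (by omega)
  have h4 : Nat.choose (v + 1) v = v + 1 := Nat.choose_succ_self_right v
  rw [h2] at h1
  omega

lemma exists_sand (v kn : Nat) (hk : 1 ≤ kn) :
    ∃ n, Nat.choose n kn ≤ v ∧ v < Nat.choose (n + 1) kn := by
  classical
  set P : Nat → Prop := fun n => Nat.choose n kn ≤ v with hP
  have h0 : P 0 := by simp [hP, Nat.choose_eq_zero_of_lt (show 0 < kn by omega)]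
  set n := Nat.findGreatest P (v + kn) with hn
  have hspec : P n := Nat.findGreatest_spec (m := 0) (by omega) h0
  refine ⟨n, hspec, ?_⟩
  by_cases hle : n + 1 ≤ v + kn
  · have hng : ¬ P (n + 1) :=
      Nat.findGreatest_is_greatest (by omega) hle
    simpa [hP] using hng
  · have : v + kn ≤ n := by omega
    have h1 := Nat.choose_le_choose kn (show v + kn ≤ n + 1 by omega)
    have h2 := choose_big v kn hk
    omega

-- A's inner loop computes exactly the sandwich digit and its binomial
lemma gmcLoop_eq (kn n vn : Nat)
    (hs1 : Nat.choose n kn ≤ vn) (hs2 : vn < Nat.choose (n + 1) kn) :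
    ∀ (f : Nat) (rn : Nat), kn ≤ rn → rn ≤ n → Nat.choose rn kn ≤ vn → n - rn < f →
    gmcLoop f (↑vn) (↑rn) (↑(Nat.choose rn kn)) ((rn : Int) - (kn : Int) + 1)
      = ((n : Int), (Nat.choose n kn : Int)) := by
  intro f
  induction f with
  | zero => intro rn _ _ _ hlt; omega
  | succ f ih =>
    intro rn hkr hrn hle hlt
    have hden : ((rn : Int) - (kn : Int) + 1) = ((rn + 1 - kn : Nat) : Int) := by
      push_cast [Nat.cast_sub (by omega : kn ≤ rn + 1)]; ring
    have hmulnat : Nat.choose rn kn * (rn + 1) = Nat.choose (rn + 1) kn * (rn + 1 - kn) :=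
      Nat.choose_mul_succ_eq rn kn
    have hnext : PySem.Int.floordiv ((Nat.choose rn kn : Int) * ((rn : Int) + 1)) ((rn : Int) - (kn : Int) + 1)
        = ((Nat.choose (rn + 1) kn : Nat) : Int) := by
      rw [hden]
      have : ((Nat.choose rn kn : Int) * ((rn : Int) + 1)) = ((Nat.choose rn kn * (rn + 1) : Nat) : Int) := by
        push_cast; ring
      rw [this, PySem.Int.floordiv_natCast]
      congr 1
      rw [hmulnat]
      exact Nat.mul_div_cancel _ (by omega)
    show gmcLoop (f + 1) _ _ _ _ = _
    rw [gmcLoop]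
    simp only [hnext]
    by_cases hbig : ((Nat.choose (rn + 1) kn : Nat) : Int) > (vn : Int)
    · rw [if_pos hbig]
      have hb : vn < Nat.choose (rn + 1) kn := by exact_mod_cast hbig
      have : rn = n := sand_unique hle hb hs1 hs2
      subst this; rfl
    · rw [if_neg hbig]
      have hb : Nat.choose (rn + 1) kn ≤ vn := by
        have := not_lt.mp hbig; exact_mod_cast this
      have hrn' : rn + 1 ≤ n := by
        rcases Nat.lt_or_ge rn n with h | h
        · omega
        · have : rn = n := by omega
          subst this; omega
      have harg : ((rn : Int) - (kn : Int) + 1) + 1 = ((rn + 1 : Nat) : Int) - (kn : Int) + 1 := by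
        push_cast; ring
      have := ih (rn + 1) (by omega) hrn' hb (by omega)
      rw [show ((rn : Int) + 1) = ((rn + 1 : Nat) : Int) by push_cast; ring, harg]
      exact this

lemma getMax_eq (kn n vn : Nat) (hk1 : 1 ≤ kn)
    (hs1 : Nat.choose n kn ≤ vn) (hs2 : vn < Nat.choose (n + 1) kn) :
    getMaxCombinLessThan (↑vn) (↑kn) = ((n : Int), (Nat.choose n kn : Int)) := by
  unfold getMaxCombinLessThan
  by_cases hv : vn = 0
  · subst hv
    rw [if_pos (by norm_num)]
    have hz : Nat.choose n kn = 0 := by omega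
    have hlt : n < kn := by
      by_contra h
      push_neg at h
      have := Nat.choose_pos h
      omega
    have hge : kn ≤ n + 1 := by
      by_contra h
      push_neg at h
      rw [Nat.choose_eq_zero_of_lt (by omega)] at hs2
      omega
    have hn : n = kn - 1 := by omega
    subst hn
    have hcast : ((kn : Int) - 1) = ((kn - 1 : Nat) : Int) := by omega
    rw [hcast, hz]
    simp
  · rw [if_neg (by exact_mod_cast hv)]
    have hvn1 : 1 ≤ vn := by omega
    have hkn_le : kn ≤ n := by
      by_contra h
      push_neg at h
      have h1 : Nat.choose (n + 1) kn ≤ 1 := by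
        rcases Nat.lt_or_ge (n + 1) kn with h2 | h2
        · simp [Nat.choose_eq_zero_of_lt h2]
        · have : n + 1 = kn := by omega
          simp [this]
      omega
    have hne : n < kn + vn := by
      by_contra h
      push_neg at h
      have := Nat.choose_le_choose kn (show vn + kn ≤ n by omega)
      have := choose_big vn kn hk1
      omega
    have h1 : (Int.toNat (vn : Int)) = vn := Int.toNat_natCast vn
    have := gmcLoop_eq kn n vn hs1 hs2 (vn + 2) kn (le_refl _) hkn_le
      (by simp [Nat.choose_self]; omega) (by omega)
    rw [h1]
    simpa [Nat.choose_self] using this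

-- B's binomial helper computes Nat.choose
lemma combGo_inv (nn kn : Nat) (hkn : kn ≤ nn) :
    ∀ (f jn : Nat), jn + f = kn →
    combGo (↑nn) (↑kn) (↑(Nat.choose (nn - kn + jn) jn)) ((jn : Int) + 1) f
      = ((Nat.choose (nn - kn + f + jn) (jn + f) : Nat) : Int) := by
  intro f
  induction f with
  | zero => intro jn h; simp [combGo]
  | succ f ih =>
    intro jn h
    rw [combGo]
    have hterm : (↑nn - ↑kn + ((jn : Int) + 1)) = ((nn - kn + jn + 1 : Nat) : Int) := by
      push_cast [Nat.cast_sub hkn]; ring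
    set mn := nn - kn + jn with hmn
    have hmulnat : (mn + 1) * Nat.choose mn jn = Nat.choose (mn + 1) (jn + 1) * (jn + 1) :=
      Nat.add_one_mul_choose_eq mn jn
    have hc : PySem.Int.floordiv ((Nat.choose mn jn : Int) * (↑nn - ↑kn + ((jn : Int) + 1))) ((jn : Int) + 1)
        = ((Nat.choose (mn + 1) (jn + 1) : Nat) : Int) := by
      rw [hterm]
      have : ((Nat.choose mn jn : Int) * ((mn + 1 : Nat) : Int)) = ((Nat.choose mn jn * (mn + 1) : Nat) : Int) := by
        push_cast; ring
      rw [show ((jn : Int) + 1) = ((jn + 1 : Nat) : Int) by push_cast; ring, this,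
        PySem.Int.floordiv_natCast]
      congr 1
      rw [Nat.mul_comm, hmulnat]
      exact Nat.mul_div_cancel _ (by omega)
    rw [hc]
    have harg : ((jn : Int) + 1) + 1 = ((jn + 1 : Nat) : Int) + 1 := by push_cast; ring
    have h2 := ih (jn + 1) (by omega)
    rw [harg]
    have : mn + 1 = nn - kn + (jn + 1) := by omega
    rw [this]
    rw [h2]
    congr 2 <;> omega

lemma combB_eq (nn kn : Nat) :
    combB (↑nn) (↑kn) = ((Nat.choose nn kn : Nat) : Int) := by
  unfold combB
  rcases Nat.lt_or_ge nn kn with hlt | hge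
  · rw [if_pos (Or.inr (by exact_mod_cast hlt))]
    rw [Nat.choose_eq_zero_of_lt hlt]
    simp
  · rw [if_neg (by omega)]
    have hmin : min ((kn : Int)) ((nn : Int) - (kn : Int)) = ((min kn (nn - kn) : Nat) : Int) := by
      push_cast [Nat.cast_sub hge]
      rfl
    set k2 := min kn (nn - kn) with hk2
    have hk2n : k2 ≤ nn := by omega
    simp only [hmin, Int.toNat_natCast]
    have := combGo_inv nn k2 hk2n k2 0 (by omega)
    have hsymm : Nat.choose nn k2 = Nat.choose nn kn := by
      rcases min_cases kn (nn - kn) with ⟨h1, _⟩ | ⟨h1, _⟩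
      · rw [hk2, h1]
      · rw [hk2, h1]
        exact Nat.choose_symm hge
    rw [← hsymm]
    simpa [Nat.sub_add_cancel hk2n] using this

-- growD returns an offset d above lo = k-1 whose binomial exceeds v
lemma growD_eq (vn kn : Nat) (hk : 1 ≤ kn) :
    ∀ (f dn : Nat), 1 ≤ dn → vn + 1 ≤ dn * 2 ^ f →
    ∃ dn' : Nat, growD (↑vn) (↑kn) (↑(kn - 1)) (↑dn) f = ↑dn' ∧ 1 ≤ dn' ∧
      vn < Nat.choose (kn - 1 + dn') kn := by
  intro f
  induction f with
  | zero =>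
    intro dn hdn hbound
    refine ⟨dn, rfl, hdn, ?_⟩
    have h1 := Nat.choose_le_choose kn (show vn + kn ≤ kn - 1 + dn by omega)
    have h2 := choose_big vn kn hk
    omega
  | succ f ih =>
    intro dn hdn hbound
    rw [growD]
    rw [show ((kn - 1 : Nat) : Int) + (dn : Int) = ((kn - 1 + dn : Nat) : Int) by push_cast; ring]
    rw [combB_eq (kn - 1 + dn) kn]
    by_cases hc : ((Nat.choose (kn - 1 + dn) kn : Nat) : Int) ≤ (vn : Int)
    · rw [if_pos hc]
      rw [show ((dn : Int) * 2) = ((dn * 2 : Nat) : Int) by push_cast; ring]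
      exact ih (dn * 2) (by omega) (by rw [pow_succ] at hbound; nlinarith)
    · rw [if_neg hc]
      exact ⟨dn, rfl, hdn, by exact_mod_cast not_le.mp hc⟩

-- the bisection converges to the sandwich digit
lemma bisect_eq (vn kn n : Nat)
    (hs1 : Nat.choose n kn ≤ vn) (hs2 : vn < Nat.choose (n + 1) kn) :
    ∀ (f lon hin : Nat), kn ≤ lon + 1 → lon < hin →
      Nat.choose lon kn ≤ vn → vn < Nat.choose hin kn → hin - lon ≤ f + 1 →
    bisectGo (↑vn) (↑kn) (↑lon) (↑hin) f = (n : Int) := by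
  intro f
  induction f with
  | zero =>
    intro lon hin hklo hlh hlo hhi hgap
    have : hin = lon + 1 := by omega
    subst this
    have : lon = n := sand_unique hlo hhi hs1 hs2
    subst this; rfl
  | succ f ih =>
    intro lon hin hklo hlh hlo hhi hgap
    rw [bisectGo]
    by_cases hg : hin - lon ≤ 1
    · have : hin = lon + 1 := by omega
      subst this
      rw [if_neg (by push_cast; omega)]
      have : lon = n := sand_unique hlo hhi hs1 hs2
      subst this; rfl
    · rw [if_pos (by omega)]
      have hmid : PySem.Int.floordiv ((lon : Int) + (hin : Int)) 2
          = (((lon + hin) / 2 : Nat) : Int) := by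
        rw [show ((lon : Int) + (hin : Int)) = ((lon + hin : Nat) : Int) by push_cast; ring]
        exact_mod_cast PySem.Int.floordiv_natCast (lon + hin) 2
      simp only [hmid]
      set mn := (lon + hin) / 2 with hmn
      have hml : lon < mn := by omega
      have hmh : mn < hin := by omega
      simp only [combB_eq mn kn]
      by_cases hc : ((Nat.choose mn kn : Nat) : Int) ≤ (vn : Int)
      · rw [if_pos hc]
        exact ih mn hin (by omega) hmh (by exact_mod_cast hc) hhi (by omega)
      · rw [if_neg hc]
        exact ih lon mn hklo hml hlo (by exact_mod_cast not_le.mp hc) (by omega)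

lemma altStep_eq (vn kn n : Nat) (hk1 : 1 ≤ kn)
    (hs1 : Nat.choose n kn ≤ vn) (hs2 : vn < Nat.choose (n + 1) kn) :
    altStep (↑vn) (↑kn) = (n : Int) := by
  unfold altStep
  rw [Int.toNat_natCast]
  have hk1' : ((kn : Int) - 1) = ((kn - 1 : Nat) : Int) := by omega
  rw [hk1']
  have hpow : vn + 1 ≤ 1 * 2 ^ (vn + 2) := by
    have h1 : vn + 2 < 2 ^ (vn + 2) := Nat.lt_two_pow_self
    omega
  obtain ⟨dn', heq, hdn, hbig⟩ := growD_eq vn kn hk1 (vn + 2) 1 (le_refl _) hpow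
  have heq' : growD (↑vn) (↑kn) (↑(kn - 1)) (1 : Int) (vn + 2) = ↑dn' := by
    simpa using heq
  simp only [heq']
  rw [show ((kn - 1 : Nat) : Int) + (dn' : Int) = ((kn - 1 + dn' : Nat) : Int) by push_cast; ring]
  have hfuel : (((kn - 1 + dn' : Nat) : Int) - ((kn - 1 : Nat) : Int)).toNat = dn' := by
    rw [show (((kn - 1 + dn' : Nat) : Int) - ((kn - 1 : Nat) : Int)) = ((dn' : Nat) : Int) by
      push_cast; ring]
    exact Int.toNat_natCast _
  rw [hfuel]
  apply bisect_eq vn kn n hs1 hs2 dn' (kn - 1) (kn - 1 + dn') (by omega) (by omega)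
    (by simp [Nat.choose_eq_zero_of_lt (show kn - 1 < kn by omega)]) hbig (by omega)

-- accumulator lemma for B's outer loop
lemma gsiAltGo_acc : ∀ (f : Nat) (v m : Int) (acc : List Int),
    gsiAltGo f v m acc = acc ++ gsiAltGo f v m [] := by
  intro f
  induction f with
  | zero => intro v m acc; simp [gsiAltGo]
  | succ f ih =>
    intro v m acc
    rw [gsiAltGo, gsiAltGo]
    by_cases hm : m > 0
    · rw [if_pos hm, if_pos hm]
      rw [ih _ _ (acc ++ [altStep v m]), ih _ _ ([] ++ [altStep v m])]
      simp
    · rw [if_neg hm, if_neg hm]; simp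

-- the two outer loops agree step by step
lemma main_loop : ∀ (f : Nat) (v m : Int) (acc : List Int), 0 ≤ v →
    gsiGo f v m acc = (gsiAltGo f v m []).reverse ++ acc := by
  intro f
  induction f with
  | zero => intro v m acc hv; simp [gsiGo, gsiAltGo]
  | succ f ih =>
    intro v m acc hv
    rw [gsiGo, gsiAltGo]
    by_cases hm : m > 0
    · rw [if_pos hm, if_pos hm]
      set kn := m.toNat with hkn
      have hm' : m = (kn : Int) := by omega
      have hk1 : 1 ≤ kn := by omega
      set vn := v.toNat with hvn
      have hv' : v = (vn : Int) := by omega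
      obtain ⟨n, hs1, hs2⟩ := exists_sand vn kn hk1
      have hA : getMaxCombinLessThan v m = ((n : Int), (Nat.choose n kn : Int)) := by
        rw [hv', hm']; exact getMax_eq kn n vn hk1 hs1 hs2
      have hB : altStep v m = (n : Int) := by
        rw [hv', hm']; exact altStep_eq vn kn n hk1 hs1 hs2
      have hcomb : combB ((n : Int)) m = (Nat.choose n kn : Int) := by
        rw [hm']; exact combB_eq n kn
      simp only [hA, hB, hcomb]
      have hv2 : 0 ≤ v - (Nat.choose n kn : Int) := by
        rw [hv']; omega
      rw [ih _ _ _ hv2]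
      rw [gsiAltGo_acc f _ _ ([] ++ [(n : Int)])]
      simp
    · rw [if_neg hm, if_neg hm]; simp

-- ===== VERDICT (by name: the statement is the Claim_ definition above) =====
theorem getSeparatorIndices_spec : Claim_equal_getSeparatorIndices := by
  intro index m _ hpre
  unfold Spec_getSeparatorIndices getSeparatorIndices getSeparatorIndices_alt
  rcases hpre with hpre | hpre
  · rw [main_loop m.toNat index m [] hpre]
    simp
  · have h0 : m.toNat = 0 := by omega
    rw [h0]
    rfl
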